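-- pv_equiv track=rewrite | github.com/Sotelo-Nazareno/Python_Progra_1 | clase-11/functions.py | obtener_lista_de_tipos
-- ===== SOURCE A (Python) =====
-- def calcular_cantidad_tipo(lista_heroes: list[dict], key:str)->dict:
--     """
--     Calcula la cantidad de un tipo dado en la lista
--
--     Args:
--         lista_heroes (list[dict]): La lista de heroes
--         key (str): Un dato en la lista de heroes
--     """
--
--     diccionario = dict()
--
--     if len(lista_heroes) > 0:
--         for heroe in lista_heroes:
--             if heroe.get(key) not in diccionario:
--                 diccionario[heroe.get(key)] = 1
--             else:
--                 diccionario[heroe.get(key)] += 1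
--
--     return diccionario
--
-- def obtener_lista_de_tipos(lista_heroes: list[dict], key:str)->list:
--     """
--     Obtiene una lista de tipos de la key de la lista de heroes sin repetidos
--
--     Args:
--         lista_heroes (list[dict]): La lista de heroes
--         key (str): Un dato de la lista de heroes
--
--     Returns:
--         list: Devuelve una lista sin repetidos
--     """
--
--     tipos_sin_repetir = set()
--     tipos =  calcular_cantidad_tipo(lista_heroes, key)
--
--     for clave in tipos.keys():
--         if clave in ('-', '', None):
--             tipos_sin_repetir.add('N/A')
--         else:
--             tipos_sin_repetir.add(clave)
--
--     lista = list(tipos_sin_repetir)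
--     return lista
-- ===== SOURCE B (Python) =====
-- def obtener_lista_de_tipos(lista_heroes: list[dict], key: str) -> list:
--     """Single pass over lista_heroes: no intermediate count dict."""
--     tipos_sin_repetir = set()
--     for heroe in lista_heroes:
--         clave = heroe.get(key)
--         tipos_sin_repetir.add('N/A' if clave in ('-', '', None) else clave)
--     return list(tipos_sin_repetir)
-- ===== Notes on version B (the rewrite author's own statement) =====
-- stated objective: simpler
-- what changed: B drops the calcular_cantidad_tipo helper and its count dict entirely, building the result set in one direct pass over lista_heroes instead of A's two-pass build-a-count-table-then-scan-its-keys shape.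
import Mathlib
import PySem

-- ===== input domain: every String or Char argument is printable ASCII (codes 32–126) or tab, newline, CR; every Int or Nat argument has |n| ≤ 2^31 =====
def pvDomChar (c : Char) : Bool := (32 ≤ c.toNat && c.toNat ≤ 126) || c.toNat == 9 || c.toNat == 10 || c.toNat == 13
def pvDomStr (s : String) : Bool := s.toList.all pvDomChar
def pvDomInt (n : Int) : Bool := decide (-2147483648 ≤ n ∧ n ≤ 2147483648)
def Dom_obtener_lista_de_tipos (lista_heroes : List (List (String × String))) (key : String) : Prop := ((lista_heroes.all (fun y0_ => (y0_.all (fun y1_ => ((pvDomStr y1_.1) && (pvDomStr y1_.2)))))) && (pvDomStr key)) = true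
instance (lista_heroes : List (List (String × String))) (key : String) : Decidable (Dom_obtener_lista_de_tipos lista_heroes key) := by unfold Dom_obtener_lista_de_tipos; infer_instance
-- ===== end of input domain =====

-- B replaces A's two-pass shape (build a count dict, then scan its keys) by one direct pass
-- building the result set over lista_heroes; return-value equivalence only (order = first insertion,
-- Python's list(set) hash order is compared as a set by the task).


-- ===== PORT A =====
-- helper of A: the count dict keyed by heroe.get(key) (Option String: None for a missing key)
def calcular_cantidad_tipo (lista_heroes : List (List (String × String))) (key : String) : PySem.Dict (Option String) Int :=
  let diccionario : PySem.Dict (Option String) Int := PySem.Dict.empty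
  if lista_heroes.length > 0 then
    lista_heroes.foldl (fun d heroe =>
      if PySem.Dict.contains d (heroe.lookup key) = false then   -- 'heroe.get(key) not in diccionario'
        PySem.Dict.insert d (heroe.lookup key) 1
      else
        PySem.Dict.modify d (heroe.lookup key) 0 (· + 1)) diccionario
  else diccionario

def obtener_lista_de_tipos (lista_heroes : List (List (String × String))) (key : String) : List String :=
  let tipos_sin_repetir : PySem.Set String := PySem.Set.empty
  let tipos := calcular_cantidad_tipo lista_heroes key
  let lista := (PySem.Dict.keys tipos).foldl (fun s clave =>
      if clave = some "-" ∨ clave = some "" ∨ clave = none then PySem.Set.add s "N/A"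
      else PySem.Set.add s (clave.getD "")) tipos_sin_repetir   -- else-branch: clave ≠ none, so getD is exact
  lista

-- ===== PORT B =====
def obtener_lista_de_tipos_alt (lista_heroes : List (List (String × String))) (key : String) : List String :=
  lista_heroes.foldl (fun (tipos_sin_repetir : PySem.Set String) heroe =>
    let clave := heroe.lookup key
    PySem.Set.add tipos_sin_repetir
      (match clave with
        | none => "N/A"
        | some c => if c = "-" ∨ c = "" then "N/A" else c)) PySem.Set.empty

-- ===== PRECONDITION & SPEC =====
def Spec_obtener_lista_de_tipos (lista_heroes : List (List (String × String))) (key : String) (out : List String) : Prop := out = obtener_lista_de_tipos_alt lista_heroes key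
instance (lista_heroes : List (List (String × String))) (key : String) (out : List String) : Decidable (Spec_obtener_lista_de_tipos lista_heroes key out) := by unfold Spec_obtener_lista_de_tipos; infer_instance

-- ===== CLAIM (what is proved, stated in full; the proofs are below) =====
def Claim_equal_obtener_lista_de_tipos : Prop := ∀ (lista_heroes : List (List (String × String))) (key : String), Dom_obtener_lista_de_tipos lista_heroes key → Spec_obtener_lista_de_tipos lista_heroes key (obtener_lista_de_tipos lista_heroes key)

-- ===== LEMMAS AND PROOFS =====

-- the shared sentinel mapping, as B's match writes it
def pvF (clave : Option String) : String :=
  match clave with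
  | none => "N/A"
  | some c => if c = "-" ∨ c = "" then "N/A" else c

-- A's second-loop body is exactly 'add s (pvF clave)'
theorem pvBodyA_eq :
    (fun (s : PySem.Set String) (clave : Option String) =>
      if clave = some "-" ∨ clave = some "" ∨ clave = none then PySem.Set.add s "N/A"
      else PySem.Set.add s (clave.getD "")) =
    (fun (s : PySem.Set String) clave => PySem.Set.add s (pvF clave)) := by
  funext s clave
  cases clave with
  | none => simp [pvF]
  | some c => by_cases h : c = "-" ∨ c = ""
              · simp [pvF, h]
              · simp [pvF, h]

-- A's guard 'if len > 0' is vacuous: the fold over [] returns the empty dict anyway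
theorem pvCalc_eq_foldl (lista_heroes : List (List (String × String))) (key : String) :
    calcular_cantidad_tipo lista_heroes key =
      lista_heroes.foldl (fun d heroe =>
        if PySem.Dict.contains d (heroe.lookup key) = false then
          PySem.Dict.insert d (heroe.lookup key) 1
        else
          PySem.Dict.modify d (heroe.lookup key) 0 (· + 1)) PySem.Dict.empty := by
  cases lista_heroes with
  | nil => simp [calcular_cantidad_tipo]
  | cons h t => simp [calcular_cantidad_tipo]

-- the keys of A's count dict grow exactly like a Set of the looked-up claves
theorem pvKeys_foldl (xs : List (Option String)) :
    ∀ (d : PySem.Dict (Option String) Int),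
    (xs.foldl (fun d x =>
        if PySem.Dict.contains d x = false then PySem.Dict.insert d x 1
        else PySem.Dict.modify d x 0 (· + 1)) d).keys = PySem.Set.update d.keys xs := by
  induction xs with
  | nil => intro d; simp [PySem.Set.update_nil]
  | cons x xs ih =>
      intro d
      rw [List.foldl_cons, ih, PySem.Set.update_cons]
      congr 1
      by_cases h : PySem.Dict.contains d x = false
      · have hnm : x ∉ PySem.Dict.keys d := fun hm => by
          simp [(PySem.Dict.contains_iff_mem_keys d x).mpr hm] at h
        rw [if_pos h, PySem.Dict.keys_insert_of_not_contains d _ h,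
          PySem.Set.add_of_not_mem hnm]
      · have hc : PySem.Dict.contains d x = true := by simpa using h
        rw [if_neg h, PySem.Dict.keys_modify, PySem.Dict.keys_insert_of_contains d _ hc,
          PySem.Set.add_of_mem ((PySem.Dict.contains_iff_mem_keys d x).mp hc)]

-- folding 'add ∘ pvF' over xs dedup'd (Set.update from any prior set) = continuing the fold over xs
theorem pvFold_update (xs : List (Option String)) :
    ∀ (k : PySem.Set (Option String)),
    (PySem.Set.update k xs).foldl (fun s c => PySem.Set.add s (pvF c)) PySem.Set.empty =
      xs.foldl (fun s c => PySem.Set.add s (pvF c))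
        (k.foldl (fun s c => PySem.Set.add s (pvF c)) PySem.Set.empty) := by
  induction xs with
  | nil => intro k; simp [PySem.Set.update_nil]
  | cons x xs ih =>
      intro k
      rw [PySem.Set.update_cons, ih, List.foldl_cons]
      congr 1
      by_cases h : x ∈ k
      · rw [PySem.Set.add_of_mem h, PySem.Set.add_of_mem]
        rw [PySem.Set.mem_foldl_add]
        exact Or.inr ⟨x, h, rfl⟩
      · rw [PySem.Set.add_of_not_mem h, List.foldl_append, List.foldl_cons, List.foldl_nil]

-- ===== VERDICT (by name: the statement is the Claim_ definition above) =====
theorem obtener_lista_de_tipos_spec : Claim_equal_obtener_lista_de_tipos := by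
  intro lista_heroes key _
  show obtener_lista_de_tipos lista_heroes key = obtener_lista_de_tipos_alt lista_heroes key
  have hB : obtener_lista_de_tipos_alt lista_heroes key
      = (lista_heroes.map (fun h => List.lookup key h)).foldl
          (fun s c => PySem.Set.add s (pvF c)) PySem.Set.empty := by
    rw [List.foldl_map]
    rfl
  have hA : obtener_lista_de_tipos lista_heroes key
      = ((lista_heroes.map (fun h => List.lookup key h)).foldl
          (fun (d : PySem.Dict (Option String) Int) x =>
            if PySem.Dict.contains d x = false then PySem.Dict.insert d x 1
            else PySem.Dict.modify d x 0 (· + 1)) PySem.Dict.empty).keys.foldl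
          (fun s c => PySem.Set.add s (pvF c)) PySem.Set.empty := by
    rw [List.foldl_map]
    simp only [obtener_lista_de_tipos]
    rw [pvCalc_eq_foldl, pvBodyA_eq]
  rw [hA, hB, pvKeys_foldl, PySem.Dict.keys_empty, pvFold_update, List.foldl_nil]
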